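-- pv_equiv track=rewrite | github.com/alexkryu4kov/leetcode | Longest Subarray Sum Less Than K.py | longest_sum
-- ===== SOURCE A (Python) =====
-- def longest_sum(nums, target):
--     left = 0
--     answer = 0
--     for right in range(len(nums)):
--         if left >= right:
--             continue
--         if sum(nums[left:right]) <= target:
--             temp_answer = right - left
--             if temp_answer > answer:
--                 answer = temp_answer
--         else:
--             left += 1
--     return answer
-- ===== SOURCE B (Python) =====
-- def longest_sum(nums, target):
--     left = 0
--     answer = 0
--     window = 0
--     for right in range(1, len(nums)):
--         window += nums[right - 1]
--         if window <= target:
--             if right - left > answer: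
--                 answer = right - left
--         else:
--             window -= nums[left]
--             left += 1
--     return answer
-- ===== Notes on version B (the rewrite author's own statement) =====
-- stated objective: faster
-- what changed: B maintains the current window sum incrementally (add the new right element, subtract the dropped left element) instead of recomputing sum(nums[left:right]) by slicing on every iteration, and drops A's dead left>=right skip branch by starting the loop at 1.
import Mathlib
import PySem

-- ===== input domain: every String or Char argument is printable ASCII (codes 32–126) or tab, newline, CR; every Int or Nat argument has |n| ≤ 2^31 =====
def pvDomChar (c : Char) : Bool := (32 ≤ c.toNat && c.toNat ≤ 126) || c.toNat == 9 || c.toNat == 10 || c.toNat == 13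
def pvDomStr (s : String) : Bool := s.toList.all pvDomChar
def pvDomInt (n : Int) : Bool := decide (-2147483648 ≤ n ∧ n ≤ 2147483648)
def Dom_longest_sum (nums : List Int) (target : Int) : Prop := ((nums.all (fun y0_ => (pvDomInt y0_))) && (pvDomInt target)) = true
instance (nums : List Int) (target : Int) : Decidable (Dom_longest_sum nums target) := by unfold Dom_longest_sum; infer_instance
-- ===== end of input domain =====

-- B maintains the window sum incrementally instead of re-summing a slice each iteration.

-- ===== PORT A =====
def longest_sum (nums : List Int) (target : Int) : Int :=
  ((PySem.List.pyRange 0 nums.length 1).foldl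
    (fun (st : Int × Int) right =>
      if st.1 ≥ right then st
      else if (PySem.List.slice nums (some st.1) (some right)).sum ≤ target then
        let temp_answer := right - st.1
        if temp_answer > st.2 then (st.1, temp_answer) else st
      else (st.1 + 1, st.2))
    (0, 0)).2

-- ===== PORT B =====
def longest_sum_alt (nums : List Int) (target : Int) : Int :=
  ((PySem.List.pyRange 1 nums.length 1).foldl
    (fun (st : Int × Int × Int) right =>
      let window := st.2.2 + PySem.List.pyGetD nums (right - 1) 0
      if window ≤ target then
        if right - st.1 > st.2.1 then (st.1, right - st.1, window) else (st.1, st.2.1, window)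
      else (st.1 + 1, st.2.1, window - PySem.List.pyGetD nums st.1 0))
    (0, 0, 0)).2.1

-- ===== PRECONDITION & SPEC =====
def Spec_longest_sum (nums : List Int) (target : Int) (out : Int) : Prop := out = longest_sum_alt nums target
instance (nums : List Int) (target : Int) (out : Int) : Decidable (Spec_longest_sum nums target out) := by unfold Spec_longest_sum; infer_instance

-- ===== CLAIM (what is proved, stated in full; the proofs are below) =====
def Claim_equal_longest_sum : Prop := ∀ (nums : List Int) (target : Int), Dom_longest_sum nums target → Spec_longest_sum nums target (longest_sum nums target)

-- ===== LEMMAS AND PROOFS =====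

-- window sum abbreviation used only in the proofs: sum of nums[l:r] for 0 ≤ l ≤ r
def pvW (nums : List Int) (l r : Int) : Int :=
  ((nums.drop l.toNat).take (r.toNat - l.toNat)).sum

theorem pvW_extend (nums : List Int) (l r : Int) (hl : 0 ≤ l) (hlr : l ≤ r)
    (hr : r < nums.length) :
    pvW nums l r + PySem.List.pyGetD nums r 0 = pvW nums l (r + 1) := by
  have hr0 : 0 ≤ r := le_trans hl hlr
  have hjl : (r + 1).toNat - l.toNat = (r.toNat - l.toNat) + 1 := by omega
  have hjlen : r.toNat < nums.length := by omega
  have hd : (nums.drop l.toNat)[r.toNat - l.toNat]? = some nums[r.toNat] := by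
    rw [List.getElem?_drop]
    have : l.toNat + (r.toNat - l.toNat) = r.toNat := by omega
    rw [this, List.getElem?_eq_getElem hjlen]
  rw [PySem.List.pyGetD_eq_getElem nums 0 hr0 hr]
  simp [pvW, hjl, List.take_add_one, hd]

theorem pvW_shrink (nums : List Int) (l r : Int) (hl : 0 ≤ l) (hlr : l < r)
    (hr : r ≤ nums.length) :
    pvW nums l r - PySem.List.pyGetD nums l 0 = pvW nums (l + 1) r := by
  have hllen : l < nums.length := by omega
  have hlnat : l.toNat < nums.length := by omega
  have hdrop : nums.drop l.toNat = nums[l.toNat] :: nums.drop (l.toNat + 1) :=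
    List.drop_eq_getElem_cons hlnat
  have hk : r.toNat - l.toNat = (r.toNat - (l + 1).toNat) + 1 := by omega
  have hl1 : (l + 1).toNat = l.toNat + 1 := by omega
  rw [PySem.List.pyGetD_eq_getElem nums 0 hl hllen]
  unfold pvW
  rw [hdrop, hk, hl1, List.take_succ_cons, List.sum_cons]
  ring

theorem pv_slice_sum (nums : List Int) (l r : Int) (hl : 0 ≤ l) (hr : 0 ≤ r) :
    (PySem.List.slice nums (some l) (some r)).sum = pvW nums l r := by
  rw [PySem.List.slice_toNat nums hl hr]; rfl

theorem pv_loop (nums : List Int) (target : Int) :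
    ∀ (k : Nat) (r l a : Int), 0 ≤ l → l < r → (nums.length : Int) - r = k →
    ((PySem.List.pyRange r nums.length 1).foldl
      (fun (st : Int × Int) right =>
        if st.1 ≥ right then st
        else if (PySem.List.slice nums (some st.1) (some right)).sum ≤ target then
          let temp_answer := right - st.1
          if temp_answer > st.2 then (st.1, temp_answer) else st
        else (st.1 + 1, st.2)) (l, a)).2
    = ((PySem.List.pyRange r nums.length 1).foldl
      (fun (st : Int × Int × Int) right =>
        let window := st.2.2 + PySem.List.pyGetD nums (right - 1) 0
        if window ≤ target then
          if right - st.1 > st.2.1 then (st.1, right - st.1, window) else (st.1, st.2.1, window)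
        else (st.1 + 1, st.2.1, window - PySem.List.pyGetD nums st.1 0))
      (l, a, pvW nums l (r - 1))).2.1 := by
  intro k
  induction k with
  | zero =>
    intro r l a hl hlr hk
    rw [PySem.List.pyRange_one_eq_nil (by omega)]
    rfl
  | succ k ih =>
    intro r l a hl hlr hk
    have hrn : r < (nums.length : Int) := by omega
    have hwin : pvW nums l (r - 1) + PySem.List.pyGetD nums (r - 1) 0 = pvW nums l r := by
      have h := pvW_extend nums l (r - 1) hl (by omega) (by omega)
      rw [sub_add_cancel] at h
      exact h
    rw [PySem.List.pyRange_one_cons hrn]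
    simp only [List.foldl_cons, hwin]
    rw [if_neg (by omega : ¬ (l ≥ r))]
    rw [pv_slice_sum nums l r hl (by omega)]
    by_cases hc : pvW nums l r ≤ target
    · rw [if_pos hc, if_pos hc]
      by_cases hb : r - l > a
      · rw [if_pos hb, if_pos hb]
        have h := ih (r + 1) l (r - l) hl (by omega) (by omega)
        rw [add_sub_cancel_right] at h
        exact h
      · rw [if_neg hb, if_neg hb]
        have h := ih (r + 1) l a hl (by omega) (by omega)
        rw [add_sub_cancel_right] at h
        exact h
    · rw [if_neg hc, if_neg hc]
      rw [pvW_shrink nums l r hl hlr (by omega)]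
      have h := ih (r + 1) (l + 1) a (by omega) (by omega) (by omega)
      rw [add_sub_cancel_right] at h
      exact h

-- ===== VERDICT (by name: the statement is the Claim_ definition above) =====
theorem longest_sum_spec : Claim_equal_longest_sum := by
  unfold Claim_equal_longest_sum Spec_longest_sum
  intro nums target _
  unfold longest_sum longest_sum_alt
  rcases Nat.eq_zero_or_pos nums.length with h0 | hpos
  · rw [h0]
    simp [PySem.List.pyRange_one_eq_nil]
  · have h01 : (0 : Int) < (nums.length : Int) := by exact_mod_cast hpos
    rw [PySem.List.pyRange_one_cons h01]
    simp only [List.foldl_cons]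
    rw [if_pos (le_refl (0 : Int))]
    have h := pv_loop nums target (nums.length - 1) 1 0 0 le_rfl (by omega) (by omega)
    have hz : pvW nums 0 (1 - 1) = 0 := by simp [pvW]
    rw [hz] at h
    exact h
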